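-- pv_equiv track=rewrite | github.com/molly12345molly/Test | chedan/chedanV1.py | f
-- ===== SOURCE A (Python) =====
-- def iscon(L):
--     a=max(L)
--     b=min(L)
--     if a-b+1==len(set(L)) and len(L)>1:
--         return True
--     else:
--         return False
--
-- def f(a):
--     b=[]
--     c=[]
--     for i in range(len(a)):
--         j=len(a)
--         while j>i:
--             if iscon(a[i:j]):
--                 b.append(a[i:j])
--                 c.append(j-i+1)
--                 break
--             j-=1
--     for k in range(len(c)):
--         if c[k] == max(c):
--             return b[k]
-- ===== SOURCE B (Python) =====
-- def f(a):
--     # One expanding pass per start with running min/max and a seen-set: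
--     # O(n^2) instead of A's O(n^3) rescans of each slice.
--     n = len(a)
--     best = None
--     best_len = 0
--     for i in range(n):
--         mn = mx = a[i]
--         seen = {a[i]}
--         length = 1
--         cand = 0
--         for x in a[i + 1:]:
--             length += 1
--             if x < mn:
--                 mn = x
--             if x > mx:
--                 mx = x
--             seen.add(x)
--             if mx - mn + 1 == len(seen):
--                 cand = length
--         if cand > best_len:
--             best_len = cand
--             best = a[i:i + cand]
--     return best
-- ===== Notes on version B (the rewrite author's own statement) =====
-- stated objective: faster
-- what changed: Instead of re-scanning every slice a[i:j] with max/min/set (A's inner while plus iscon) and then a second pass to pick the first maximum, B makes one expanding pass per start that maintains a running min, max and seen-set and keeps the earliest longest window on the fly.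
import Mathlib
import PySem

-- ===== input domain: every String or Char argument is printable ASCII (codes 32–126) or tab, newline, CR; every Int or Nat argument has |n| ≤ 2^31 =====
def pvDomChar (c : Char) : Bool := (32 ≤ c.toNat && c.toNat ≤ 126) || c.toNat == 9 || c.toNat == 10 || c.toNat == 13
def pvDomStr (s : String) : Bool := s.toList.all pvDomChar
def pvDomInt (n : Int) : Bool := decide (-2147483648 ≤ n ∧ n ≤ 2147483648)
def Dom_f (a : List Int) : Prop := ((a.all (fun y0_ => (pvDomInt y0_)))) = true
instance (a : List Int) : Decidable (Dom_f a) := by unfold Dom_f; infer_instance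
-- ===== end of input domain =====

-- B replaces A's rescan of every slice by one expanding pass per start with a
-- running min/max and seen-set (objective: faster).

-- ===== PORT A =====
-- helper iscon(L); max()/min() raise on [], but f only calls iscon on nonempty slices,
-- so the catch-all branch is unreachable
def iscon (L : List Int) : Bool :=
  match PySem.List.max? L (fun x => x), PySem.List.min? L (fun x => x) with
  | some mx, some mn =>
      decide (mx - mn + 1 = ((PySem.Set.ofList L).length : Int)) && decide (L.length > 1)
  | _, _ => false

-- the inner 'while j > i' loop of A; returns the appended (slice, j-i+1) or none
def fInner (a : List Int) (i j : Nat) : Option (List Int × Int) :=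
  if i < j then
    let s := PySem.List.slice a (some (i : Int)) (some (j : Int))
    if iscon s then some (s, (j : Int) - (i : Int) + 1)
    else fInner a i (j - 1)
  else none
termination_by j
decreasing_by omega

-- the second 'for k in range(len(c))' loop of A
def fLoop2 (b : List (List Int)) (c : List Int) (k : Nat) : Option (List Int) :=
  if h : k < c.length then
    if PySem.List.pyGet? c (k : Int) = PySem.List.max? c (fun x => x) then PySem.List.pyGet? b (k : Int)
    else fLoop2 b c (k + 1)
  else none
termination_by c.length - k
decreasing_by omega

def f (a : List Int) : Option (List Int) :=
  let bc := (List.range a.length).foldl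
    (fun (bc : List (List Int) × List Int) i =>
      match fInner a i a.length with
      | some (s, v) => (bc.1 ++ [s], bc.2 ++ [v])
      | none => bc) ([], [])
  fLoop2 bc.1 bc.2 0

-- ===== PORT B =====
-- inner loop of Source B: fold over a[i+1:] with state (mn, mx, seen, length, cand)
def bScan (x0 : Int) (tl : List Int) : Int :=
  (tl.foldl
    (fun (st : Int × Int × PySem.Set Int × Int × Int) x =>
      let len := st.2.2.2.1 + 1
      let mn := if x < st.1 then x else st.1
      let mx := if st.2.1 < x then x else st.2.1
      let seen := PySem.Set.add st.2.2.1 x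
      let cand := if mx - mn + 1 = (seen.length : Int) then len else st.2.2.2.2
      (mn, mx, seen, len, cand))
    (x0, x0, PySem.Set.ofList [x0], 1, 0)).2.2.2.2

def f_alt (a : List Int) : Option (List Int) :=
  ((List.range a.length).foldl
    (fun (st : Int × Option (List Int)) (i : Nat) =>
      let x0 := PySem.List.pyGetD a (i : Int) 0
      let cand := bScan x0 (PySem.List.slice a (some ((i : Int) + 1)) none)
      if st.1 < cand then
        (cand, some (PySem.List.slice a (some (i : Int)) (some ((i : Int) + cand))))
      else st)
    (0, none)).2

-- ===== PRECONDITION & SPEC =====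
def Spec_f (a : List Int) (out : Option (List Int)) : Prop := out = f_alt a
instance (a : List Int) (out : Option (List Int)) : Decidable (Spec_f a out) := by unfold Spec_f; infer_instance

-- ===== CLAIM (what is proved, stated in full; the proofs are below) =====
def Claim_equal_f : Prop := ∀ (a : List Int), Dom_f a → Spec_f a (f a)

-- ===== LEMMAS AND PROOFS =====

def winF (a : List Int) (i k : Nat) : List Int := (a.drop i).take (k - i)

def candF (x0 : Int) (t : List Int) : Nat :=
  Nat.findGreatest (fun m => iscon (x0 :: t.take m) = true) t.length

def cNF (a : List Int) (i : Nat) : Nat := candF (a.getD i 0) (a.drop (i+1))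

def lenF (a : List Int) (i : Nat) : Nat := if cNF a i = 0 then 0 else cNF a i + 1

lemma iscon_singleton (x : Int) : iscon [x] = false := by
  simp [iscon, PySem.List.max?, PySem.List.min?]

lemma iscon_cons (x : Int) (t : List Int) (h : t ≠ []) :
    iscon (x :: t) =
      decide (t.foldl max x - t.foldl min x + 1 = ((PySem.Set.ofList (x :: t)).length : Int)) := by
  rw [iscon, PySem.List.max?_id_cons, PySem.List.min?_id_cons]
  have : 1 ≤ t.length := List.length_pos_iff.mpr h
  simp [Nat.lt_iff_add_one_le, this]

lemma min_if (m y : Int) : (if y < m then y else m) = min m y := by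
  simp only [min_def]; split_ifs <;> omega

lemma max_if (m y : Int) : (if m < y then y else m) = max m y := by
  simp only [max_def]; split_ifs <;> omega

lemma findGreatest_congr (P Q : Nat → Prop) [DecidablePred P] [DecidablePred Q] (n : Nat)
    (h : ∀ m ≤ n, (P m ↔ Q m)) : Nat.findGreatest P n = Nat.findGreatest Q n := by
  induction n with
  | zero => simp
  | succ n ih =>
      rw [Nat.findGreatest_succ, Nat.findGreatest_succ]
      by_cases hp : P (n + 1)
      · rw [if_pos hp, if_pos ((h (n+1) le_rfl).mp hp)]
      · rw [if_neg hp, if_neg (fun hq => hp ((h (n+1) le_rfl).mpr hq)),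
          ih (fun m hm => h m (Nat.le_succ_of_le hm))]

lemma candF_append (x0 x : Int) (t : List Int) :
    candF x0 (t ++ [x]) =
      if iscon (x0 :: (t ++ [x])) = true then t.length + 1 else candF x0 t := by
  unfold candF
  have hl : (t ++ [x]).length = t.length + 1 := by simp
  rw [hl, Nat.findGreatest_succ]
  have h1 : (t ++ [x]).take (t.length + 1) = t ++ [x] := List.take_of_length_le (by simp)
  rw [h1]
  by_cases hc : iscon (x0 :: (t ++ [x])) = true
  · rw [if_pos hc, if_pos hc]
  · rw [if_neg hc, if_neg hc]
    exact findGreatest_congr _ _ _ (fun m hm => by rw [List.take_append_of_le_length hm])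

lemma bFold (x0 : Int) (t : List Int) :
    t.foldl
      (fun (st : Int × Int × PySem.Set Int × Int × Int) x =>
        let len := st.2.2.2.1 + 1
        let mn := if x < st.1 then x else st.1
        let mx := if st.2.1 < x then x else st.2.1
        let seen := PySem.Set.add st.2.2.1 x
        let cand := if mx - mn + 1 = (seen.length : Int) then len else st.2.2.2.2
        (mn, mx, seen, len, cand))
      (x0, x0, PySem.Set.ofList [x0], 1, 0)
    = (t.foldl min x0, t.foldl max x0, PySem.Set.ofList (x0 :: t), ((1 + t.length : Nat) : Int),
       (if candF x0 t = 0 then (0 : Int) else ((candF x0 t + 1 : Nat) : Int))) := by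
  induction t using List.reverseRecOn with
  | nil => simp [candF]
  | append_singleton t x ih =>
      rw [List.foldl_append, List.foldl_append, List.foldl_append, ih]
      simp only [List.foldl_cons, List.foldl_nil]
      rw [min_if, max_if]
      have hseen : PySem.Set.add (PySem.Set.ofList (x0 :: t)) x = PySem.Set.ofList (x0 :: (t ++ [x])) := by
        rw [← List.cons_append, PySem.Set.ofList_append_singleton]
      have hne : t ++ [x] ≠ [] := by simp
      have hcons := iscon_cons x0 (t ++ [x]) hne
      rw [List.foldl_append, List.foldl_append] at hcons
      simp only [List.foldl_cons, List.foldl_nil] at hcons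
      have hcand := candF_append x0 x t
      rw [hseen, hcand]
      by_cases hc : iscon (x0 :: (t ++ [x])) = true
      · have h2 : max (List.foldl max x0 t) x - min (List.foldl min x0 t) x + 1 =
            ((PySem.Set.ofList (x0 :: (t ++ [x]))).length : Int) :=
          of_decide_eq_true (hcons ▸ hc)
        rw [if_pos hc, if_pos h2]
        simp only [Prod.mk.injEq]
        refine ⟨trivial, trivial, trivial, ?_, ?_⟩
        · simp; ring
        · rw [if_neg (by omega : ¬ (t.length + 1 = 0))]
          push_cast
          ring
      · have h2 : ¬ (max (List.foldl max x0 t) x - min (List.foldl min x0 t) x + 1 =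
            ((PySem.Set.ofList (x0 :: (t ++ [x]))).length : Int)) := by
          intro h; exact hc (hcons ▸ decide_eq_true h)
        rw [if_neg hc, if_neg h2]
        simp only [Prod.mk.injEq]
        exact ⟨trivial, trivial, trivial, by simp; ring, trivial⟩

lemma bScan_eq (x0 : Int) (t : List Int) :
    bScan x0 t = (if candF x0 t = 0 then (0 : Int) else ((candF x0 t + 1 : Nat) : Int)) := by
  rw [bScan, bFold]

lemma fInner_eq (a : List Int) (i : Nat) : ∀ j : Nat,
    fInner a i j =
      (if Nat.findGreatest (fun k => i < k ∧ iscon (winF a i k) = true) j = 0 then none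
       else some (winF a i (Nat.findGreatest (fun k => i < k ∧ iscon (winF a i k) = true) j),
         ((Nat.findGreatest (fun k => i < k ∧ iscon (winF a i k) = true) j : Nat) : Int) - (i : Int) + 1)) := by
  intro j
  induction j with
  | zero => rw [fInner]; simp
  | succ j ih =>
      rw [fInner]
      by_cases hij : i < j + 1
      · rw [if_pos hij]
        have hsl : PySem.List.slice a (some ((i : Nat) : Int)) (some (((j + 1 : Nat)) : Int))
            = winF a i (j + 1) := by
          rw [PySem.List.slice_natCast]; rfl
        rw [Nat.findGreatest_succ]
        by_cases hc : iscon (winF a i (j + 1)) = true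
        · have hp : i < j + 1 ∧ iscon (winF a i (j + 1)) = true := ⟨hij, hc⟩
          rw [if_pos hp]
          simp only [hsl, hc, if_pos]
          rw [if_neg (by omega : ¬ (j + 1 = 0))]
        · have hp : ¬ (i < j + 1 ∧ iscon (winF a i (j + 1)) = true) := fun h => hc h.2
          rw [if_neg hp]
          simp only [hsl]
          rw [if_neg (by simp [hc])]
          simpa using ih
      · rw [if_neg hij]
        have h0 : Nat.findGreatest (fun k => i < k ∧ iscon (winF a i k) = true) (j + 1) = 0 := by
          rw [Nat.findGreatest_eq_zero_iff]
          intro k hk hkle ⟨hik, _⟩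
          omega
        rw [if_pos h0]

lemma win_cons (a : List Int) (i k : Nat) (hi : i < a.length) (hk : i < k) :
    winF a i k = a.getD i 0 :: (a.drop (i + 1)).take (k - i - 1) := by
  unfold winF
  rw [List.drop_eq_getElem_cons hi]
  have h1 : k - i = (k - i - 1) + 1 := by omega
  conv_lhs => rw [h1]
  rw [List.take_succ_cons, List.getD_eq_getElem a 0 hi]

lemma fg_shift (a : List Int) (i : Nat) (hi : i < a.length) : ∀ d : Nat,
    Nat.findGreatest (fun k => i < k ∧ iscon (winF a i k) = true) (i + 1 + d)
    = (if Nat.findGreatest (fun m => iscon (a.getD i 0 :: (a.drop (i + 1)).take m) = true) d = 0 then 0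
       else i + 1 + Nat.findGreatest (fun m => iscon (a.getD i 0 :: (a.drop (i + 1)).take m) = true) d) := by
  intro d
  induction d with
  | zero =>
      simp only [Nat.findGreatest_zero]
      rw [if_pos trivial, Nat.findGreatest_eq_zero_iff]
      intro k hk hkle ⟨hik, hcon⟩
      have hk1 : k = i + 1 := by omega
      subst hk1
      rw [win_cons a i (i + 1) hi (by omega)] at hcon
      simp only [Nat.add_sub_cancel_left, Nat.sub_self, List.take_zero] at hcon
      rw [iscon_singleton] at hcon
      exact Bool.false_ne_true hcon
  | succ d ih =>
      have htop : (i + 1 + (d + 1)) = (i + 1 + d) + 1 := by omega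
      rw [htop, Nat.findGreatest_succ, Nat.findGreatest_succ]
      have hwin : winF a i (i + 1 + d + 1) = a.getD i 0 :: (a.drop (i + 1)).take (d + 1) := by
        rw [win_cons a i _ hi (by omega)]
        have h2 : i + 1 + d + 1 - i - 1 = d + 1 := by omega
        rw [h2]
      by_cases hq : iscon (a.getD i 0 :: (a.drop (i + 1)).take (d + 1)) = true
      · have hp : i < i + 1 + d + 1 ∧ iscon (winF a i (i + 1 + d + 1)) = true :=
          ⟨by omega, by rw [hwin]; exact hq⟩
        rw [if_pos hp, if_pos hq, if_neg (by omega : ¬ (d + 1 = 0))]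
        omega
      · have hp : ¬ (i < i + 1 + d + 1 ∧ iscon (winF a i (i + 1 + d + 1)) = true) := by
          intro h
          exact hq (by rw [← hwin]; exact h.2)
        rw [if_neg hp, if_neg hq, ih]

lemma fLoop2_aux (bs : List (List Int)) (cs : List Int) (hbs : bs.length = cs.length) :
    ∀ m k, cs.length - k ≤ m →
      fLoop2 bs cs k =
        (((cs.zip bs).drop k).find?
          (fun p => decide (some p.1 = PySem.List.max? cs (fun x => x)))).map Prod.snd := by
  intro m
  induction m with
  | zero =>
      intro k hk
      rw [fLoop2]
      have h1 : ¬ k < cs.length := by omega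
      rw [dif_neg h1]
      have h2 : (cs.zip bs).length ≤ k := by
        rw [List.length_zip]
        omega
      rw [List.drop_eq_nil_of_le h2]
      rfl
  | succ m ih =>
      intro k hk
      rw [fLoop2]
      by_cases h1 : k < cs.length
      · rw [dif_pos h1]
        have hz : k < (cs.zip bs).length := by rw [List.length_zip]; omega
        have hdrop : (cs.zip bs).drop k = (cs.zip bs)[k] :: (cs.zip bs).drop (k + 1) :=
          List.drop_eq_getElem_cons hz
        have hget : (cs.zip bs)[k] = (cs[k]'h1, bs[k]'(by omega)) := List.getElem_zip ..
        have hpg : PySem.List.pyGet? cs ((k : Nat) : Int) = some (cs[k]'h1) := by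
          rw [PySem.List.pyGet?_natCast]
          exact List.getElem?_eq_getElem h1
        have hpb : PySem.List.pyGet? bs ((k : Nat) : Int) = some (bs[k]'(by omega)) := by
          rw [PySem.List.pyGet?_natCast]
          exact List.getElem?_eq_getElem (by omega)
        rw [hdrop, hget]
        by_cases hc : some (cs[k]'h1) = PySem.List.max? cs (fun x => x)
        · rw [if_pos (by rw [hpg]; exact hc)]
          rw [List.find?_cons_of_pos (by simpa using hc)]
          simp [hpb]
        · rw [if_neg (by rw [hpg]; exact hc)]
          rw [List.find?_cons_of_neg (by simpa using hc)]
          exact ih (k + 1) (by omega)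
      · rw [dif_neg h1]
        have h2 : (cs.zip bs).length ≤ k := by rw [List.length_zip]; omega
        rw [List.drop_eq_nil_of_le h2]
        rfl

lemma foldl_max_attain {α : Type} (g : α → Int) : ∀ (l : List α) (m0 : Int),
    l.foldl (fun m x => max m (g x)) m0 = m0 ∨
      ∃ x ∈ l, l.foldl (fun m x => max m (g x)) m0 = g x := by
  intro l
  induction l with
  | nil => intro m0; left; rfl
  | cons a l ih =>
      intro m0
      simp only [List.foldl_cons]
      rcases le_total (g a) m0 with h | h
      · rw [max_eq_left h]
        rcases ih m0 with h1 | ⟨x, hx, h1⟩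
        · left; exact h1
        · right; exact ⟨x, List.mem_cons_of_mem _ hx, h1⟩
      · rw [max_eq_right h]
        rcases ih (g a) with h1 | ⟨x, hx, h1⟩
        · right; exact ⟨a, List.mem_cons_self .., h1⟩
        · right; exact ⟨x, List.mem_cons_of_mem _ hx, h1⟩

lemma foldl_max_le_of {α : Type} (g : α → Int) : ∀ (l : List α) (m0 B : Int),
    m0 ≤ B → (∀ x ∈ l, g x ≤ B) → l.foldl (fun m x => max m (g x)) m0 ≤ B := by
  intro l
  induction l with
  | nil => intro m0 B h _; exact h
  | cons a l ih =>
      intro m0 B h hall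
      simp only [List.foldl_cons]
      exact ih _ _ (max_le h (hall a (List.mem_cons_self ..)))
        (fun x hx => hall x (List.mem_cons_of_mem _ hx))

lemma pick_spec {α : Type} : ∀ (l : List (Int × α)) (m0 : Int) (r0 : Option α),
    l.foldl (fun st p => if st.1 < p.1 then (p.1, some p.2) else st) (m0, r0)
    = (l.foldl (fun m p => max m p.1) m0,
       if m0 < l.foldl (fun m p => max m p.1) m0
       then (l.find? (fun p => decide (p.1 = l.foldl (fun m p => max m p.1) m0))).map Prod.snd
       else r0) := by
  intro l
  induction l with
  | nil => intro m0 r0; simp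
  | cons p l ih =>
      intro m0 r0
      simp only [List.foldl_cons]
      have hle := (PySem.List.le_foldl_max_int l (fun q => q.1) (max m0 p.1)).1
      by_cases hp : m0 < p.1
      · rw [if_pos hp]
        have hmax : max m0 p.1 = p.1 := max_eq_right (le_of_lt hp)
        simp only [hmax]; rw [ih]
        have hpM : p.1 ≤ l.foldl (fun m q => max m q.1) p.1 := by
          simpa using (PySem.List.le_foldl_max_int l (fun q => q.1) p.1).1
        have hm0M : m0 < l.foldl (fun m q => max m q.1) p.1 := lt_of_lt_of_le hp hpM
        rw [if_pos hm0M]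
        by_cases hpm : p.1 = l.foldl (fun m q => max m q.1) p.1
        · rw [if_neg (by omega), List.find?_cons_of_pos (by simpa using hpm)]
          rfl
        · have : p.1 < l.foldl (fun m q => max m q.1) p.1 := lt_of_le_of_ne hpM hpm
          rw [if_pos this, List.find?_cons_of_neg (by simpa using hpm)]
      · rw [if_neg hp]
        have hmax : max m0 p.1 = m0 := max_eq_left (by omega)
        simp only [hmax]; rw [ih]
        by_cases hm : m0 < l.foldl (fun m q => max m q.1) m0
        · rw [if_pos hm, if_pos hm]
          have hne : ¬ (p.1 = l.foldl (fun m q => max m q.1) m0) := by omega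
          rw [List.find?_cons_of_neg (by simpa using hne)]
        · rw [if_neg hm, if_neg hm]

lemma find?_filter' {α : Type} (l : List α) (p q : α → Bool) :
    (l.filter p).find? q = l.find? (fun x => p x && q x) := by
  induction l with
  | nil => rfl
  | cons a l ih =>
      rw [List.filter_cons]
      by_cases hp : p a = true
      · rw [if_pos hp]
        by_cases hq : q a = true
        · rw [List.find?_cons_of_pos hq, List.find?_cons_of_pos (by simp [hp, hq])]
        · rw [List.find?_cons_of_neg (by simpa using hq),
            List.find?_cons_of_neg (by simp [hq]), ih]
      · rw [if_neg hp, List.find?_cons_of_neg (by simp [Bool.not_eq_true] at hp ⊢; simp [hp]), ih]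
  
lemma find?_congr' {α : Type} (l : List α) (p q : α → Bool) (h : ∀ x ∈ l, p x = q x) :
    l.find? p = l.find? q := by
  induction l with
  | nil => rfl
  | cons a l ih =>
      have ha := h a (List.mem_cons_self ..)
      by_cases hp : p a = true
      · rw [List.find?_cons_of_pos hp, List.find?_cons_of_pos (ha ▸ hp)]
      · rw [List.find?_cons_of_neg (by simpa using hp),
          List.find?_cons_of_neg (by rw [← ha]; simpa using hp),
          ih (fun x hx => h x (List.mem_cons_of_mem _ hx))]

def wF (a : List Int) (i : Nat) : List Int := winF a i (i + lenF a i)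

def vF (a : List Int) (i : Nat) : Int := (lenF a i : Int) + 1

def MF (a : List Int) : Int :=
  (List.range a.length).foldl (fun m i => max m ((lenF a i : Int))) 0

lemma fB_char (a : List Int) :
    f_alt a = if 0 < MF a
      then ((List.range a.length).find? (fun i => decide ((lenF a i : Int) = MF a))).map (wF a)
      else none := by
  rw [f_alt]
  have hstep : ∀ (st : Int × Option (List Int)) (i : Nat), i ∈ List.range a.length →
      (fun (st : Int × Option (List Int)) (i : Nat) =>
        let x0 := PySem.List.pyGetD a (i : Int) 0
        let cand := bScan x0 (PySem.List.slice a (some ((i : Int) + 1)) none)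
        if st.1 < cand then
          (cand, some (PySem.List.slice a (some (i : Int)) (some ((i : Int) + cand))))
        else st) st i
      = (fun (st : Int × Option (List Int)) i =>
          if st.1 < ((lenF a i : Nat) : Int) then (((lenF a i : Nat) : Int), some (wF a i))
          else st) st i := by
    intro st i hi
    have hi' : i < a.length := List.mem_range.mp hi
    simp only []
    have h1 : PySem.List.pyGetD a ((i : Nat) : Int) 0 = a.getD i 0 := by
      rw [PySem.List.pyGetD_natCast]
    have h2 : ((i : Nat) : Int) + 1 = (((i + 1 : Nat)) : Int) := by push_cast; ring
    have h3 : PySem.List.slice a (some (((i + 1 : Nat)) : Int)) none = a.drop (i + 1) :=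
      PySem.List.slice_from_natCast ..
    have hb : bScan (a.getD i 0) (a.drop (i + 1)) = ((lenF a i : Nat) : Int) := by
      rw [bScan_eq]
      unfold lenF cNF
      split_ifs <;> simp
    rw [h1, h2, h3, hb]
    by_cases hlt : st.1 < ((lenF a i : Nat) : Int)
    · rw [if_pos hlt, if_pos hlt]
      have h5 : PySem.List.slice a (some ((i : Nat) : Int))
          (some (((i : Nat) : Int) + ((lenF a i : Nat) : Int))) = wF a i := by
        rw [PySem.List.slice_natCast_add]
        unfold wF winF
        congr 1
        omega
      rw [h5]
    · rw [if_neg hlt, if_neg hlt]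
  rw [PySem.List.foldl_congr_mem _ _ _ _ hstep]
  rw [show ((fun (st : Int × Option (List Int)) (i : Nat) =>
        if st.1 < ((lenF a i : Nat) : Int) then (((lenF a i : Nat) : Int), some (wF a i))
        else st)
      = (fun (st : Int × Option (List Int)) (i : Nat) =>
          (fun (st : Int × Option (List Int)) (p : Int × List Int) =>
            if st.1 < p.1 then (p.1, some p.2) else st) st (((lenF a i : Nat) : Int), wF a i)))
      from rfl]
  rw [← List.foldl_map (f := fun i => (((lenF a i : Nat) : Int), wF a i))
      (g := fun (st : Int × Option (List Int)) (p : Int × List Int) =>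
        if st.1 < p.1 then (p.1, some p.2) else st)]
  rw [pick_spec]
  have hM : List.foldl (fun m (p : Int × List Int) => max m p.1) 0
      ((List.range a.length).map (fun i => (((lenF a i : Nat) : Int), wF a i))) = MF a := by
    rw [List.foldl_map]
    rfl
  rw [hM]
  by_cases h0 : 0 < MF a
  · rw [if_pos h0, if_pos h0, List.find?_map]
    rw [Option.map_map]
    rfl
  · rw [if_neg h0, if_neg h0]

lemma fInner_top (a : List Int) (i : Nat) (hi : i < a.length) :
    fInner a i a.length = if lenF a i = 0 then none else some (wF a i, vF a i) := by
  rw [fInner_eq]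
  have hlen : a.length = i + 1 + (a.length - i - 1) := by omega
  rw [hlen, fg_shift a i hi]
  have hcn : Nat.findGreatest
      (fun m => iscon (a.getD i 0 :: (a.drop (i + 1)).take m) = true) (a.length - i - 1)
      = cNF a i := by
    unfold cNF candF
    congr 1
    rw [List.length_drop]
    omega
  rw [hcn]
  by_cases h0 : cNF a i = 0
  · rw [if_pos h0, if_pos rfl, if_pos (show lenF a i = 0 by unfold lenF; rw [if_pos h0])]
  · rw [if_neg h0, if_neg (by omega : ¬ (i + 1 + cNF a i = 0)),
      if_neg (show ¬ lenF a i = 0 by unfold lenF; rw [if_neg h0]; omega)]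
    have hw2 : winF a i (i + 1 + cNF a i) = wF a i := by
      unfold wF
      congr 1
      unfold lenF
      rw [if_neg h0]
      omega
    have hv : ((i + 1 + cNF a i : Nat) : Int) - (i : Int) + 1 = vF a i := by
      unfold vF lenF
      rw [if_neg h0]
      push_cast
      omega
    rw [hw2, hv]

lemma fA_char (a : List Int) :
    f a = if 0 < MF a
      then ((List.range a.length).find? (fun i => decide ((lenF a i : Int) = MF a))).map (wF a)
      else none := by
  rw [f]
  have hstep : ∀ (bc : List (List Int) × List Int), ∀ i ∈ List.range a.length,
      (fun (bc : List (List Int) × List Int) i =>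
        match fInner a i a.length with
        | some (s, v) => (bc.1 ++ [s], bc.2 ++ [v])
        | none => bc) bc i
      = (fun (bc : List (List Int) × List Int) i =>
          (if decide (lenF a i ≠ 0) then bc.1 ++ [wF a i] else bc.1,
           if decide (lenF a i ≠ 0) then bc.2 ++ [vF a i] else bc.2)) bc i := by
    intro bc i hi
    have hi' : i < a.length := List.mem_range.mp hi
    simp only []
    rw [fInner_top a i hi']
    by_cases h0 : lenF a i = 0
    · rw [if_pos h0]
      simp [h0]
    · rw [if_neg h0]
      simp [h0]
  rw [PySem.List.foldl_congr_mem _ _ _ _ hstep,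
    PySem.List.foldl_prod_mk
      (f := fun s i => if decide (lenF a i ≠ 0) then s ++ [wF a i] else s)
      (g := fun s i => if decide (lenF a i ≠ 0) then s ++ [vF a i] else s),
    PySem.List.foldl_append_if (fun i => decide (lenF a i ≠ 0)) (wF a),
    PySem.List.foldl_append_if (fun i => decide (lenF a i ≠ 0)) (vF a)]
  simp only [List.nil_append]
  rw [fLoop2_aux _ _ (by simp) (((List.range a.length).filter (fun i => decide (lenF a i ≠ 0))).length) 0 (by simp)]
  rw [List.drop_zero, List.zip_map', List.find?_map, Option.map_map]
  set V := (List.range a.length).filter (fun i => decide (lenF a i ≠ 0)) with hV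
  by_cases hVe : V = []
  · rw [hVe]
    have hM0 : MF a = 0 := by
      rcases foldl_max_attain (fun i => ((lenF a i : Nat) : Int)) (List.range a.length) 0 with h | ⟨x, hx, h⟩
      · exact h
      · by_cases hlx : lenF a x = 0
        · rw [MF, h, hlx]; rfl
        · exfalso
          have : x ∈ V := by
            rw [hV, List.mem_filter]
            exact ⟨hx, by simpa using hlx⟩
          rw [hVe] at this
          simp at this
    rw [if_neg (by omega)]
    rfl
  · obtain ⟨V0, Vt, hVc⟩ := List.exists_cons_of_ne_nil hVe
    have hmemV : ∀ i ∈ V, lenF a i ≠ 0 := by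
      intro i hiV
      rw [hV, List.mem_filter] at hiV
      simpa using hiV.2
    have hmemR : ∀ i ∈ V, i ∈ List.range a.length := by
      intro i hiV
      rw [hV, List.mem_filter] at hiV
      exact hiV.1
    have hle : ∀ i ∈ List.range a.length, ((lenF a i : Nat) : Int) ≤ MF a :=
      (PySem.List.le_foldl_max_int (List.range a.length) (fun i => ((lenF a i : Nat) : Int)) 0).2
    have hMpos : 0 < MF a := by
      have h1 := hmemV V0 (by rw [hVc]; exact List.mem_cons_self ..)
      have h2 := hle V0 (hmemR V0 (by rw [hVc]; exact List.mem_cons_self ..))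
      omega
    rw [if_pos hMpos]
    -- max? (V.map vF) = some (MF a + 1)
    have hMc : PySem.List.max? (V.map (vF a)) (fun x => x) = some (MF a + 1) := by
      rw [hVc, List.map_cons, PySem.List.max?_id_cons]
      congr 1
      apply le_antisymm
      · have := foldl_max_le_of (fun y => y) (Vt.map (vF a)) (vF a V0) (MF a + 1)
          (by
            have := hle V0 (hmemR V0 (by rw [hVc]; exact List.mem_cons_self ..))
            unfold vF; omega)
          (by
            intro x hx
            rw [List.mem_map] at hx
            obtain ⟨j, hj, rfl⟩ := hx
            have hjV : j ∈ V := by rw [hVc]; exact List.mem_cons_of_mem _ hj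
            have := hle j (hmemR j hjV)
            dsimp only
            unfold vF; omega)
        exact this
      · rcases foldl_max_attain (fun i => ((lenF a i : Nat) : Int)) (List.range a.length) 0 with h | ⟨x, hx, h⟩
        · have hM0 : MF a = 0 := by unfold MF; exact h
          omega
        · have hMx : MF a = ((lenF a x : Nat) : Int) := by unfold MF; exact h
          have hlx : lenF a x ≠ 0 := by
            intro hc
            rw [hc] at hMx
            simp at hMx
            omega
          have hxV : x ∈ V := by
            rw [hV, List.mem_filter]
            exact ⟨hx, by simpa using hlx⟩
          have hvx : vF a x = MF a + 1 := by unfold vF; omega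
          rw [hVc] at hxV
          rcases List.mem_cons.mp hxV with rfl | hxt
          · rw [← hvx]
            exact (PySem.List.le_foldl_max (Vt.map (vF a)) (vF a x)).1
          · rw [← hvx]
            exact (PySem.List.le_foldl_max (Vt.map (vF a)) (vF a V0)).2 _ (List.mem_map_of_mem hxt)
    rw [hMc]
    have h1 := find?_congr' V
      (fun i => decide (some (vF a i) = some (MF a + 1)))
      (fun i => decide (((lenF a i : Nat) : Int) = MF a))
      (fun i hi => by
        simp only [Option.some.injEq]
        rw [decide_eq_decide]
        unfold vF
        omega)
    have h2 := find?_filter' (List.range a.length)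
      (fun i => decide (lenF a i ≠ 0))
      (fun i => decide (((lenF a i : Nat) : Int) = MF a))
    have h3 := find?_congr' (List.range a.length)
      (fun i => decide (lenF a i ≠ 0) && decide (((lenF a i : Nat) : Int) = MF a))
      (fun i => decide (((lenF a i : Nat) : Int) = MF a))
      (fun i hi => by
        by_cases hq : ((lenF a i : Nat) : Int) = MF a
        · have : lenF a i ≠ 0 := by omega
          simp [hq, this]
        · simp [hq])
    have hcomp : (Prod.snd ∘ fun i => (vF a i, wF a i)) = wF a := rfl
    calc Option.map (Prod.snd ∘ fun i => (vF a i, wF a i))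
          (V.find? (fun i => decide (some (vF a i) = some (MF a + 1))))
        = Option.map (wF a) (V.find? (fun i => decide (((lenF a i : Nat) : Int) = MF a))) := by
          rw [h1, hcomp]
      _ = Option.map (wF a)
            ((List.range a.length).find? (fun i => decide (((lenF a i : Nat) : Int) = MF a))) := by
          rw [hV, h2, h3]

-- ===== VERDICT (by name: the statement is the Claim_ definition above) =====
theorem f_spec : Claim_equal_f := by
  intro a _
  unfold Spec_f
  rw [fA_char, fB_char]
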